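-- pv_equiv track=rewrite | github.com/roccobarbi/gutenberg_multi_solver | utils/solver_operations_descriptor.py | extract_unique_letters_from_descriptor
-- ===== SOURCE A (Python) =====
-- def extract_unique_letters_from_descriptor(alphabet, common, words):
--     unique = {}
--     for char in alphabet:
--         if char not in common.keys():
--             for i in range(len(words)):
--                 try:
--                     position = (i, words[i].index(char))
--                     unique[char] = position
--                 except ValueError:
--                     pass
--     return unique
-- ===== SOURCE B (Python) =====
-- def extract_unique_letters_from_descriptor(alphabet, common, words):
--     # One pass over all words: last[ch] = (word index, first index of ch in that word),
--     # later words overwrite earlier ones; then one pass over the alphabet.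
--     last = {}
--     for i, word in enumerate(words):
--         for j in reversed(range(len(word))):
--             last[word[j]] = (i, j)
--     unique = {}
--     for ch in alphabet:
--         if ch not in unique and ch not in common and ch in last:
--             unique[ch] = last[ch]
--     return unique
-- ===== Notes on version B (the rewrite author's own statement) =====
-- stated objective: faster
-- what changed: Instead of scanning every word for each alphabet letter, B makes one pass over the words building a char -> (last word index, first index in that word) dict (later words overwrite), then one pass over the alphabet filtering common/absent letters.
import Mathlib
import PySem

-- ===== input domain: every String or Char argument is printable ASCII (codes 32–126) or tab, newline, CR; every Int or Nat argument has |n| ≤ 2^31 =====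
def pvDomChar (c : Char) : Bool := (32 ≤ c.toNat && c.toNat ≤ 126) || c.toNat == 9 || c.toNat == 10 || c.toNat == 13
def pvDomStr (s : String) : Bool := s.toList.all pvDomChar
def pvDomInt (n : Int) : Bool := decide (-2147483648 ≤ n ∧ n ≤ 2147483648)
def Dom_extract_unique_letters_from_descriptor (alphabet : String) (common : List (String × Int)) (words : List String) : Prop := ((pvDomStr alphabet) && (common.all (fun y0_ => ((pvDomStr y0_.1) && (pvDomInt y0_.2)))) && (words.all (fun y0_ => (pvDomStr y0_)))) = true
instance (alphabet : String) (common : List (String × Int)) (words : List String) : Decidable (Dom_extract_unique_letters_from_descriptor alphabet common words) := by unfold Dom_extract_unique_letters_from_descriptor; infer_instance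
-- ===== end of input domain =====

-- B replaces A's per-letter scan of every word (O(|alphabet|·Σ|word|)) by one pass over the
-- words building a char → (last word, first index) dict, then one pass over the alphabet.

-- ===== PORT A =====
def extract_unique_letters_from_descriptor (alphabet : String) (common : List (String × Int)) (words : List String) : List (String × Int × Int) :=
  (alphabet.toList.foldl (fun (unique : PySem.Dict String (Int × Int)) (char : Char) =>
    if common.any (fun p => p.1 == String.ofList [char]) then unique
    else
      (List.range words.length).foldl (fun u i =>
        match PySem.List.index? (words.getD i "").toList char with
        | some j => u.insert (String.ofList [char]) ((i : Int), (j : Int))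
        | none => u) unique) PySem.Dict.empty).items

-- ===== PORT B =====
def extract_unique_letters_from_descriptor_alt (alphabet : String) (common : List (String × Int)) (words : List String) : List (String × Int × Int) :=
  let last : PySem.Dict Char (Int × Int) :=
    (PySem.List.enumerate words).foldl (fun l iw =>
      ((List.range iw.2.toList.length).reverse).foldl (fun l (j : Nat) =>
        l.insert (iw.2.toList.getD j default) (iw.1, (j : Int))) l) PySem.Dict.empty
  let unique : PySem.Dict String (Int × Int) :=
    alphabet.toList.foldl (fun u ch =>
      if u.contains (String.ofList [ch]) then u
      else if common.any (fun p => p.1 == String.ofList [ch]) then u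
      else match last.get? ch with
        | some p => u.insert (String.ofList [ch]) p
        | none => u) PySem.Dict.empty
  unique.items

-- ===== PRECONDITION & SPEC =====
def Spec_extract_unique_letters_from_descriptor (alphabet : String) (common : List (String × Int)) (words : List String) (out : List (String × Int × Int)) : Prop := out = extract_unique_letters_from_descriptor_alt alphabet common words
instance (alphabet : String) (common : List (String × Int)) (words : List String) (out : List (String × Int × Int)) : Decidable (Spec_extract_unique_letters_from_descriptor alphabet common words out) := by unfold Spec_extract_unique_letters_from_descriptor; infer_instance

-- ===== CLAIM (what is proved, stated in full; the proofs are below) =====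
def Claim_equal_extract_unique_letters_from_descriptor : Prop := ∀ (alphabet : String) (common : List (String × Int)) (words : List String), Dom_extract_unique_letters_from_descriptor alphabet common words → Spec_extract_unique_letters_from_descriptor alphabet common words (extract_unique_letters_from_descriptor alphabet common words)

-- ===== LEMMAS AND PROOFS =====

-- (word index, index of first occurrence) of c in the LAST word containing c
def lastOcc (words : List String) (c : Char) : Option (Int × Int) :=
  (PySem.List.enumerate words).foldl (fun acc iw =>
    match PySem.List.index? iw.2.toList c with
    | some j => some (iw.1, (j : Int))
    | none => acc) none

theorem lastOcc_append (ws : List String) (w : String) (c : Char) :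
    lastOcc (ws ++ [w]) c =
      match PySem.List.index? w.toList c with
      | some j => some ((ws.length : Int), (j : Int))
      | none => lastOcc ws c := by
  simp [lastOcc, PySem.List.enumerate_append, List.foldl_append, PySem.List.enumerate_cons]

theorem dict_insert_self_of_get? {κ ν : Type} [BEq κ] [LawfulBEq κ] (d : PySem.Dict κ ν)
    (k : κ) (v : ν) (hn : d.keys.Nodup) (h : d.get? k = some v) : d.insert k v = d := by
  apply PySem.Dict.ext
  have hc : d.contains k = true := by rw [PySem.Dict.contains_eq_isSome_get?, h]; rfl
  rw [PySem.Dict.items_insert_of_contains _ _ hc]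
  have : ∀ p ∈ d.items, (if p.1 == k then (k, v) else p) = p := by
    intro p hp
    have hmem : (p.1, p.2) ∈ d.items := by simpa using hp
    by_cases hpk : (p.1 == k) = true
    · have hk : p.1 = k := eq_of_beq hpk
      have hv : d.get? p.1 = some p.2 := PySem.Dict.get?_of_mem_items d hmem hn
      rw [hk, h] at hv
      have : v = p.2 := Option.some_inj.mp hv
      subst this
      rw [if_pos hpk, ← hk]
    · simp [hpk]
  calc d.items.map (fun p => if p.1 == k then (k, v) else p)
      = d.items.map id := List.map_congr_left this
    _ = d.items := List.map_id _

-- A's inner loop over all words, characterised by lastOcc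
theorem innerA_eq (words : List String) (c : Char) (u : PySem.Dict String (Int × Int)) :
    (List.range words.length).foldl (fun u i =>
        match PySem.List.index? (words.getD i "").toList c with
        | some j => u.insert (String.ofList [c]) ((i : Int), (j : Int))
        | none => u) u
    = match lastOcc words c with
      | some p => u.insert (String.ofList [c]) p
      | none => u := by
  induction words using List.reverseRecOn generalizing u with
  | nil => simp [lastOcc, PySem.List.enumerate]
  | append_singleton ws w ih =>
    have hlen : (ws ++ [w]).length = ws.length + 1 := by simp
    rw [hlen, List.range_succ, List.foldl_append]
    simp only [List.foldl_cons, List.foldl_nil]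
    have hcong : (List.range ws.length).foldl (fun u i =>
        match PySem.List.index? ((ws ++ [w]).getD i "").toList c with
        | some j => u.insert (String.ofList [c]) ((i : Int), (j : Int))
        | none => u) u
      = (List.range ws.length).foldl (fun u i =>
        match PySem.List.index? (ws.getD i "").toList c with
        | some j => u.insert (String.ofList [c]) ((i : Int), (j : Int))
        | none => u) u := by
      apply PySem.List.foldl_congr_mem
      intro acc x hx
      have hxlt : x < ws.length := List.mem_range.mp hx
      rw [List.getD_append _ _ _ _ hxlt]
    rw [hcong, ih, lastOcc_append]
    have hgetl : (ws ++ [w]).getD ws.length "" = w := by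
      simp [List.getD_eq_getElem?_getD]
    rw [hgetl]
    cases hio : PySem.List.index? w.toList c with
    | some j =>
      cases hlo : lastOcc ws c with
      | some p => simp [PySem.Dict.insert_insert_self]
      | none => simp
    | none =>
      cases hlo : lastOcc ws c with
      | some p => simp
      | none => simp

-- B's reversed per-word loop: final lookup = first occurrence in the word
theorem innerB_word (w : List Char) (i : Int) (d : PySem.Dict Char (Int × Int)) (c : Char) :
    (((List.range w.length).reverse).foldl (fun l j =>
        l.insert (w.getD j default) (i, (j : Int))) d).get? c
    = match PySem.List.index? w c with
      | some j => some (i, (j : Int))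
      | none => d.get? c := by
  induction w using List.reverseRecOn generalizing d with
  | nil => simp [PySem.List.index?]
  | append_singleton t x ih =>
    have hlen : (t ++ [x]).length = t.length + 1 := by simp
    rw [hlen, List.range_succ, List.reverse_append]
    simp only [List.reverse_singleton, List.singleton_append, List.foldl_cons]
    have hgetl : (t ++ [x]).getD t.length default = x := by
      simp [List.getD_eq_getElem?_getD]
    rw [hgetl]
    have hcong : ((List.range t.length).reverse).foldl (fun l j =>
        l.insert ((t ++ [x]).getD j default) (i, (j : Int)))
          (d.insert x (i, (t.length : Int)))
      = ((List.range t.length).reverse).foldl (fun l j =>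
        l.insert (t.getD j default) (i, (j : Int))) (d.insert x (i, (t.length : Int))) := by
      apply PySem.List.foldl_congr_mem
      intro acc j hj
      have hjlt : j < t.length := List.mem_range.mp (List.mem_reverse.mp hj)
      rw [List.getD_append _ _ _ _ hjlt]
    rw [hcong, ih]
    by_cases hmem : c ∈ t
    · rw [PySem.List.index?_append_of_mem _ hmem]
      cases hio : PySem.List.index? t c with
      | some j => simp
      | none => exact absurd ((PySem.List.index?_eq_none_iff t c).mp hio) (by simpa using hmem)
    · have hnone : PySem.List.index? t c = none := (PySem.List.index?_eq_none_iff t c).mpr hmem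
      rw [hnone]
      by_cases hcx : c = x
      · subst hcx
        rw [PySem.List.index?_append_singleton_self _ _ hmem]
        simp [PySem.Dict.get?_insert_self]
      · have hno2 : PySem.List.index? (t ++ [x]) c = none := by
          apply (PySem.List.index?_eq_none_iff _ c).mpr
          simp only [List.mem_append, List.mem_singleton]
          rintro (h | h)
          · exact hmem h
          · exact hcx h
        rw [hno2, PySem.Dict.get?_insert_of_ne _ _ hcx]

-- B's whole word pass: the dict agrees with lastOcc
theorem lastDict_get? (words : List String) (d : PySem.Dict Char (Int × Int)) (c : Char) :
    ((PySem.List.enumerate words).foldl (fun l iw =>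
      ((List.range iw.2.toList.length).reverse).foldl (fun l j =>
        l.insert (iw.2.toList.getD j default) (iw.1, (j : Int))) l) d).get? c
    = match lastOcc words c with
      | some p => some p
      | none => d.get? c := by
  induction words using List.reverseRecOn generalizing d with
  | nil => simp [lastOcc, PySem.List.enumerate]
  | append_singleton ws w ih =>
    rw [PySem.List.enumerate_append, List.foldl_append]
    simp only [PySem.List.enumerate_cons, PySem.List.enumerate_nil, List.foldl_cons, List.foldl_nil]
    rw [innerB_word, lastOcc_append]
    cases hio : PySem.List.index? w.toList c with
    | some j => simp
    | none =>
      rw [ih]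

-- invariant carried through the alphabet loop
def DInv (words : List String) (d : PySem.Dict String (Int × Int)) : Prop :=
  d.keys.Nodup ∧ ∀ c v, d.get? (String.ofList [c]) = some v → lastOcc words c = some v

theorem outer_eq (common : List (String × Int)) (words : List String) :
    ∀ (l : List Char) (d : PySem.Dict String (Int × Int)), DInv words d →
    l.foldl (fun (unique : PySem.Dict String (Int × Int)) (char : Char) =>
      if common.any (fun p => p.1 == String.ofList [char]) then unique
      else
        (List.range words.length).foldl (fun u i =>
          match PySem.List.index? (words.getD i "").toList char with
          | some j => u.insert (String.ofList [char]) ((i : Int), (j : Int))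
          | none => u) unique) d
    = l.foldl (fun u ch =>
      if u.contains (String.ofList [ch]) then u
      else if common.any (fun p => p.1 == String.ofList [ch]) then u
      else match lastOcc words ch with
        | some p => u.insert (String.ofList [ch]) p
        | none => u) d := by
  intro l
  induction l with
  | nil => intro d _; rfl
  | cons c l ih =>
    intro d hinv
    obtain ⟨hnd, hval⟩ := hinv
    simp only [List.foldl_cons]
    rw [innerA_eq]
    by_cases hcon : d.contains (String.ofList [c]) = true
    · -- already present: both sides leave d unchanged
      have hsome : ∃ v, d.get? (String.ofList [c]) = some v := by
        rw [PySem.Dict.contains_eq_isSome_get?] at hcon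
        exact Option.isSome_iff_exists.mp hcon
      obtain ⟨v, hv⟩ := hsome
      have hlo : lastOcc words c = some v := hval c v hv
      simp only [hlo, dict_insert_self_of_get? d _ v hnd hv, if_pos hcon, ite_self]
      exact ih d ⟨hnd, hval⟩
    · rw [if_neg hcon]
      by_cases hcom : common.any (fun p => p.1 == String.ofList [c]) = true
      · simp only [if_pos hcom]; exact ih d ⟨hnd, hval⟩
      · simp only [if_neg hcom]
        cases hlo : lastOcc words c with
        | none => exact ih d ⟨hnd, hval⟩
        | some p =>
          apply ih
          constructor
          · exact PySem.Dict.nodup_keys_insert _ _ _ hnd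
          · intro c' v' hv'
            rw [PySem.Dict.get?_insert] at hv'
            by_cases hcc : String.ofList [c'] = String.ofList [c]
            · have : c' = c := by
                have h2 := String.ofList_inj.mp hcc
                simpa using h2
              subst this
              rw [if_pos rfl] at hv'
              rw [hlo, Option.some_inj.mp hv']
            · rw [if_neg hcc] at hv'
              exact hval c' v' hv'

-- ===== VERDICT (by name: the statement is the Claim_ definition above) =====
theorem extract_unique_letters_from_descriptor_spec : Claim_equal_extract_unique_letters_from_descriptor := by
  intro alphabet common words _
  unfold Spec_extract_unique_letters_from_descriptor
  unfold extract_unique_letters_from_descriptor extract_unique_letters_from_descriptor_alt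
  apply congrArg PySem.Dict.items
  have h := outer_eq common words alphabet.toList PySem.Dict.empty
    ⟨PySem.Dict.nodup_keys_empty,
     by intro c v hv; rw [PySem.Dict.get?_empty] at hv; cases hv⟩
  rw [h]
  apply PySem.List.foldl_congr_mem
  intro acc ch _
  rw [lastDict_get? words PySem.Dict.empty ch]
  cases hlo : lastOcc words ch <;> simp
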